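-- pv_equiv track=rewrite | github.com/MOysolova/Python | is_decreasing.py | is_decreasing
-- ===== SOURCE A (Python) =====
-- def is_decreasing(seq):
--     index = 0
--     result = True
--     for number in seq:
--         if index < len(seq) - 1:
--             next_number = seq[index + 1]
--             if number < next_number:
--                 result = False
--                 break
--         index += 1
--     return result
-- ===== SOURCE B (Python) =====
-- def is_decreasing(seq):
--     return list(seq) == sorted(seq, reverse=True)
-- ===== Notes on version B (the rewrite author's own statement) =====
-- stated objective: idiomatic
-- what changed: Replaces the index-based adjacent-pair scan with a stable reverse-sort and whole-list comparison: the sequence is non-increasing iff it equals its descending sorted copy.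
import Mathlib
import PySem

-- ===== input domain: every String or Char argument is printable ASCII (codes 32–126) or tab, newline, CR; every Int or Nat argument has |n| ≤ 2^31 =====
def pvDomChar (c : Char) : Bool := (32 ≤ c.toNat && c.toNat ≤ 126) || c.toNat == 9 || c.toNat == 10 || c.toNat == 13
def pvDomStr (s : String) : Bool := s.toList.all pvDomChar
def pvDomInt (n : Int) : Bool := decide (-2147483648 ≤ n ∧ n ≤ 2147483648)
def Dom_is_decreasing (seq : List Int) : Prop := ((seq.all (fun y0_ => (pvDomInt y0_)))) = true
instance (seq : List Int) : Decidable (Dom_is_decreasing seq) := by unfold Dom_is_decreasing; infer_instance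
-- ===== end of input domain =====

-- B replaces A's index-based adjacent-pair scan with a stable reverse-sort-and-compare (idiomatic; not faster).


-- ===== PORT A =====
-- the 'for number in seq' loop with the running 'index' and early 'break';
-- 'seq[index + 1]' is PySem.List.pyGet? (in range whenever the guard holds, so the 'none' branch is unreachable)
def is_decreasing_go (seq : List Int) : List Int → Int → Bool
  | [], _ => true
  | number :: rest, index =>
    if index < (seq.length : Int) - 1 then
      match PySem.List.pyGet? seq (index + 1) with
      | some next_number =>
        if number < next_number then false
        else is_decreasing_go seq rest (index + 1)
      | none => true
    else is_decreasing_go seq rest (index + 1)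

def is_decreasing (seq : List Int) : Bool := is_decreasing_go seq seq 0

-- ===== PORT B =====
def is_decreasing_alt (seq : List Int) : Bool :=
  seq == PySem.List.sorted seq (fun x => x) true

-- ===== PRECONDITION & SPEC =====
def Spec_is_decreasing (seq : List Int) (out : Bool) : Prop := out = is_decreasing_alt seq
instance (seq : List Int) (out : Bool) : Decidable (Spec_is_decreasing seq out) := by unfold Spec_is_decreasing; infer_instance

-- ===== CLAIM (what is proved, stated in full; the proofs are below) =====
def Claim_equal_is_decreasing : Prop := ∀ (seq : List Int), Dom_is_decreasing seq → Spec_is_decreasing seq (is_decreasing seq)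

-- ===== LEMMAS AND PROOFS =====

-- proof-only middle term: the adjacent-pair (non-increasing) check as a Bool
def nonIncB : List Int → Bool
  | a :: b :: t => decide (b ≤ a) && nonIncB (b :: t)
  | _ => true

-- A's loop on the suffix 'rest' of seq (with index = length of the consumed prefix)
-- computes the adjacent-pair check on that suffix.
theorem is_decreasing_go_eq (pre rest : List Int) :
    is_decreasing_go (pre ++ rest) rest (pre.length : Int) = nonIncB rest := by
  induction rest generalizing pre with
  | nil => simp [is_decreasing_go, nonIncB]
  | cons number rest' ih =>
    cases rest' with
    | nil =>
      have hge : ¬ ((pre.length : Int) < ((pre ++ [number]).length : Int) - 1) := by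
        simp
      rw [is_decreasing_go, if_neg hge]
      simp [is_decreasing_go, nonIncB]
    | cons y rest'' =>
      have hlt : (pre.length : Int) < ((pre ++ number :: y :: rest'').length : Int) - 1 := by
        simp; omega
      have hget : PySem.List.pyGet? (pre ++ number :: y :: rest'') ((pre.length : Int) + 1)
          = some y := by
        have : ((pre.length : Int) + 1) = ((pre.length + 1 : Nat) : Int) := by push_cast; ring
        rw [this, PySem.List.pyGet?_natCast]
        rw [List.getElem?_append_right (by omega)]
        simp
      rw [is_decreasing_go, if_pos hlt, hget]
      by_cases h : number < y
      · have hny : ¬ (y ≤ number) := by omega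
        simp [h, nonIncB, hny]
      · have := ih (pre ++ [number])
        rw [List.append_assoc] at this
        simp only [List.length_append, List.length_cons, List.length_nil, Nat.cast_add,
          Nat.cast_one, List.singleton_append] at this
        have hy : y ≤ number := by omega
        push_cast at this
        simp [h, this, nonIncB, hy]

theorem nonIncB_iff_pairwise (seq : List Int) :
    nonIncB seq = true ↔ seq.Pairwise (fun a b : Int => b ≤ a) := by
  induction seq with
  | nil => simp [nonIncB]
  | cons a l ih =>
    cases l with
    | nil => simp [nonIncB]
    | cons b t =>
      rw [nonIncB]
      simp only [Bool.and_eq_true, decide_eq_true_eq, ih, List.pairwise_cons]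
      constructor
      · rintro ⟨hba, hfb, hpt⟩
        exact ⟨fun x hx => by
          rcases List.mem_cons.mp hx with h | h
          · omega
          · exact le_trans (hfb x h) hba, hfb, hpt⟩
      · rintro ⟨hfa, hfb, hpt⟩
        exact ⟨hfa b (List.mem_cons_self ..), hfb, hpt⟩

-- B computes the same check: a list equals its stable descending sort
-- iff its adjacent pairs are non-increasing.
theorem alt_eq_nonIncB (seq : List Int) : is_decreasing_alt seq = nonIncB seq := by
  unfold is_decreasing_alt
  by_cases h : seq.Pairwise (fun a b : Int => b ≤ a)
  · have hs := PySem.List.sorted_rev_eq_self_of_pairwise (xs := seq) (key := fun x => x) h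
    rw [hs, ((nonIncB_iff_pairwise seq).mpr h)]
    simp
  · have hb : nonIncB seq = false := by
      cases hnb : nonIncB seq
      · rfl
      · exact absurd ((nonIncB_iff_pairwise seq).mp hnb) h
    rw [hb]
    simp only [beq_eq_false_iff_ne, ne_eq]
    intro heq
    exact h (by
      have := PySem.List.sorted_pairwise_rev (xs := seq) (key := fun x => x)
      rwa [← heq] at this)

-- ===== VERDICT (by name: the statement is the Claim_ definition above) =====
theorem is_decreasing_spec : Claim_equal_is_decreasing := by
  intro seq _
  unfold Spec_is_decreasing is_decreasing
  have := is_decreasing_go_eq [] seq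
  simpa [alt_eq_nonIncB] using this
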